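-- pv_equiv track=rewrite | github.com/payel-bhunia/python_code | pick_both_side.py | solve
-- ===== SOURCE A (Python) =====
-- def solve(A):
--     n=len(A)
--     pref_odd=[0]*n
--     pref_even=[0]*n
--     pref_even[0]=A[0]
--     pref_odd[0]=0
--     count=0
--     for i in range(1,n):
--         if i%2==0:
--             pref_even[i]=pref_even[i-1]+A[i]
--             pref_odd[i]=pref_odd[i-1]
--         else:
--             pref_even[i]=pref_even[i-1]
--             pref_odd[i]=pref_odd[i-1]+A[i]
--     even_b=0
--     even_a=0
--     odd_b=0
--     odd_a=0
--     for i in range(n):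
--         if i==0:
--             even_b=0
--             odd_b=0
--         else:
--             even_b=pref_even[i-1]
--             odd_b=pref_odd[i-1]
--         even_a=pref_even[n-1]-pref_even[i]
--         odd_a=pref_odd[n-1]-pref_odd[i]
--         if even_b+odd_a==odd_b+even_a:
--             count+=1
--     return count
-- ===== SOURCE B (Python) =====
-- def solve(A):
--     T = 0
--     for j, a in enumerate(A):
--         T += a if j % 2 == 0 else -a
--     count = 0
--     P = 0
--     for j, a in enumerate(A):
--         s = a if j % 2 == 0 else -a
--         if 2 * P + s == T:
--             count += 1
--         P += s
--     return count
-- ===== Notes on version B (the rewrite author's own statement) =====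
-- stated objective: simpler
-- what changed: B replaces the two prefix arrays and the second index loop reading them with a single signed running prefix (even adds, odd subtracts): it computes the signed total T once, then counts positions where 2*P + s == T in one streaming pass with O(1) extra space.
-- outside the precondition, e.g. on solve([]): A raises IndexError, B returns 0
import Mathlib
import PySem

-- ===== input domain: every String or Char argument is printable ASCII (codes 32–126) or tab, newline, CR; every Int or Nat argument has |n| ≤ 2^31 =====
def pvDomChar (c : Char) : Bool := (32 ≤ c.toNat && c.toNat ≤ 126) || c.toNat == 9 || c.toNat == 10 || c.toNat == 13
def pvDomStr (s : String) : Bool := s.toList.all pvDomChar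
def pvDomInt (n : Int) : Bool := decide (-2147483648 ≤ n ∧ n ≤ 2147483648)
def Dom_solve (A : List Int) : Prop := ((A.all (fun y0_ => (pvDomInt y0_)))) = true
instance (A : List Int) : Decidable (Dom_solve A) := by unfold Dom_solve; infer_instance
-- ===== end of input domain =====

-- B replaces A's two prefix-sum arrays and array-reading second loop by one streaming pass over a
-- single signed running prefix (even indices add, odd subtract); same results, O(1) extra space.

-- ===== PORT A =====
-- the initial assignments: pref_even[0]=A[0]; pref_odd[0]=0 over the [0]*n tables
def solveInit (A : List Int) : List Int × List Int :=
  (PySem.List.pySetD (List.replicate A.length (0:Int)) 0 (PySem.List.pyGetD A 0 0),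
   PySem.List.pySetD (List.replicate A.length (0:Int)) 0 0)

-- body of `for i in range(1, n)`
def solveStep1 (A : List Int) (st : List Int × List Int) (i : Int) : List Int × List Int :=
  if PySem.Int.mod i 2 == 0 then
    (PySem.List.pySetD st.1 i (PySem.List.pyGetD st.1 (i-1) 0 + PySem.List.pyGetD A i 0),
     PySem.List.pySetD st.2 i (PySem.List.pyGetD st.2 (i-1) 0))
  else
    (PySem.List.pySetD st.1 i (PySem.List.pyGetD st.1 (i-1) 0),
     PySem.List.pySetD st.2 i (PySem.List.pyGetD st.2 (i-1) 0 + PySem.List.pyGetD A i 0))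

-- body of `for i in range(n)`
def solveStep2 (A : List Int) (pe po : List Int) (count : Int) (i : Int) : Int :=
  let n : Int := (A.length : Int)
  let even_b := if i == 0 then (0:Int) else PySem.List.pyGetD pe (i-1) 0
  let odd_b  := if i == 0 then (0:Int) else PySem.List.pyGetD po (i-1) 0
  let even_a := PySem.List.pyGetD pe (n-1) 0 - PySem.List.pyGetD pe i 0
  let odd_a  := PySem.List.pyGetD po (n-1) 0 - PySem.List.pyGetD po i 0
  if even_b + odd_a == odd_b + even_a then count + 1 else count

def solve (A : List Int) : Int :=
  let n : Int := (A.length : Int)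
  let st := (PySem.List.pyRange 1 n).foldl (solveStep1 A) (solveInit A)
  (PySem.List.pyRange 0 n).foldl (solveStep2 A st.1 st.2) 0

-- ===== PORT B =====
-- second loop of Source B, with the precomputed total T as a parameter
def solveAltGo (A : List Int) (T : Int) : Int :=
  ((PySem.List.enumerate A).foldl
    (fun (st : Int × Int) p =>
      let s := if PySem.Int.mod p.1 2 == 0 then p.2 else -p.2
      (if 2 * st.2 + s == T then st.1 + 1 else st.1, st.2 + s)) (0, 0)).1

def solve_alt (A : List Int) : Int :=
  solveAltGo A ((PySem.List.enumerate A).foldl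
    (fun t p => t + (if PySem.Int.mod p.1 2 == 0 then p.2 else -p.2)) 0)

-- ===== PRECONDITION & SPEC =====
-- Pre_ excludes only the empty list, on which A raises IndexError (it reads A[0]).
def Pre_solve (A : List Int) : Prop := A ≠ []
instance (A : List Int) : Decidable (Pre_solve A) := by unfold Pre_solve; infer_instance
def pvWitness_solve : List Int := [1, 2, 3]

def Spec_solve (A : List Int) (out : Int) : Prop := out = solve_alt A
instance (A : List Int) (out : Int) : Decidable (Spec_solve A out) := by unfold Spec_solve; infer_instance

-- ===== CLAIM (what is proved, stated in full; the proofs are below) =====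
def Claim_equal_solve : Prop := ∀ (A : List Int), Dom_solve A → Pre_solve A → Spec_solve A (solve A)

-- ===== LEMMAS AND PROOFS =====

-- signed value of position j (even indices count +, odd −)
def sg (j : Nat) (a : Int) : Int := if j % 2 = 0 then a else -a
-- even-index / odd-index / signed prefix sums over the first m entries
def EP (A : List Int) (m : Nat) : Int :=
  ((List.range m).map (fun j => if j % 2 = 0 then A.getD j 0 else 0)).sum
def OP (A : List Int) (m : Nat) : Int :=
  ((List.range m).map (fun j => if j % 2 = 0 then 0 else A.getD j 0)).sum
def PS (A : List Int) (m : Nat) : Int :=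
  ((List.range m).map (fun j => sg j (A.getD j 0))).sum
-- the common counting predicate: position j balances both sides
def pcond (A : List Int) (j : Nat) : Bool :=
  2 * PS A j + sg j (A.getD j 0) == PS A A.length

lemma EP_succ (A : List Int) (m : Nat) :
    EP A (m+1) = EP A m + (if m % 2 = 0 then A.getD m 0 else 0) := by
  simp [EP, List.range_succ]

lemma OP_succ (A : List Int) (m : Nat) :
    OP A (m+1) = OP A m + (if m % 2 = 0 then 0 else A.getD m 0) := by
  simp [OP, List.range_succ]

lemma PS_succ (A : List Int) (m : Nat) :
    PS A (m+1) = PS A m + sg m (A.getD m 0) := by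
  simp [PS, List.range_succ]

lemma PS_eq (A : List Int) (m : Nat) : PS A m = EP A m - OP A m := by
  induction m with
  | zero => simp [PS, EP, OP]
  | succ m ih =>
      rw [PS_succ, EP_succ, OP_succ, ih, sg]
      by_cases h : m % 2 = 0 <;> simp [h] <;> ring

lemma modBeq (j : Nat) : (PySem.Int.mod (j : Int) 2 == (0:Int)) = decide (j % 2 = 0) := by
  rw [show ((2:Int)) = ((2:Nat):Int) by norm_num, PySem.Int.mod_natCast, Bool.eq_iff_iff]
  simp only [beq_iff_eq, Nat.cast_eq_zero, decide_eq_true_eq]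

-- loop-1 invariant: after processing range(1, 1+m) the tables hold the prefix sums up to index m
lemma loop1_inv (A : List Int) (h : A ≠ []) :
    ∀ m, m ≤ A.length - 1 →
    (fun st : List Int × List Int =>
      st.1.length = A.length ∧ st.2.length = A.length ∧
      ∀ k, k ≤ m → PySem.List.pyGetD st.1 (k : Int) 0 = EP A (k+1) ∧
                   PySem.List.pyGetD st.2 (k : Int) 0 = OP A (k+1))
    ((PySem.List.pyRange 1 ((1 + m : Nat) : Int)).foldl (solveStep1 A) (solveInit A)) := by
  have hlen : 1 ≤ A.length := List.length_pos_iff.mpr h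
  intro m
  induction m with
  | zero =>
      intro _
      have hr : PySem.List.pyRange 1 ((1 + 0 : Nat) : Int) = [] := by norm_num [PySem.List.pyRange]
      rw [hr]
      simp only [List.foldl_nil]
      refine ⟨by simp [solveInit, PySem.List.length_pySetD], by simp [solveInit, PySem.List.length_pySetD], ?_⟩
      intro k hk
      have : k = 0 := by omega
      subst this
      constructor
      · show PySem.List.pyGetD (solveInit A).1 ((0:Nat):Int) 0 = EP A 1
        simp only [solveInit]
        rw [show (0:Int) = ((0:Nat):Int) from rfl, PySem.List.pySetD_natCast]
        simp only [PySem.List.pyGetD_natCast, List.getD_eq_getElem?_getD]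
        rw [List.getElem?_set_self (by simpa using hlen)]
        simp [EP, List.range_one]
      · show PySem.List.pyGetD (solveInit A).2 ((0:Nat):Int) 0 = OP A 1
        simp only [solveInit]
        rw [show (0:Int) = ((0:Nat):Int) from rfl, PySem.List.pySetD_natCast]
        simp only [PySem.List.pyGetD_natCast, List.getD_eq_getElem?_getD]
        rw [List.getElem?_set_self (by simpa using hlen)]
        simp [OP, List.range_one]
  | succ m ih =>
      intro hm
      have hm' : m ≤ A.length - 1 := by omega
      have hml : m + 1 < A.length := by omega
      obtain ⟨hl1, hl2, hk⟩ := ih hm'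
      have hr : ((1 + (m+1) : Nat) : Int) = ((1 + m : Nat) : Int) + 1 := by push_cast; ring
      rw [hr, PySem.List.pyRange_one_succ_right (by push_cast; omega), List.foldl_append]
      simp only [List.foldl_cons, List.foldl_nil]
      set prev := (PySem.List.pyRange 1 ((1 + m : Nat) : Int)).foldl (solveStep1 A) (solveInit A) with hprev
      have hi : ((1 + m : Nat) : Int) = ((m + 1 : Nat) : Int) := by push_cast; ring
      rw [hi]
      have him1 : ((m + 1 : Nat) : Int) - 1 = ((m : Nat) : Int) := by push_cast; ring
      have hgetA : PySem.List.pyGetD A ((m + 1 : Nat) : Int) 0 = A.getD (m+1) 0 := PySem.List.pyGetD_natCast A (m+1) 0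
      have hEm := (hk m (le_refl m)).1
      have hOm := (hk m (le_refl m)).2
      unfold solveStep1
      rw [modBeq]
      by_cases hp : (m + 1) % 2 = 0
      · simp only [hp, decide_true, if_true]
        refine ⟨by simp [PySem.List.length_pySetD, hl1], by simp [PySem.List.length_pySetD, hl2], ?_⟩
        intro k hkle
        rw [him1, hEm, hOm, hgetA]
        constructor
        · rw [PySem.List.pyGetD_pySetD_natCast prev.1 (m+1) k _ _ (by omega)]
          by_cases hkm : k = m + 1
          · subst hkm; simp [EP_succ, hp]
          · rw [if_neg hkm, (hk k (by omega)).1]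
        · rw [PySem.List.pyGetD_pySetD_natCast prev.2 (m+1) k _ _ (by omega)]
          by_cases hkm : k = m + 1
          · subst hkm; simp [OP_succ, hp]
          · rw [if_neg hkm, (hk k (by omega)).2]
      · simp only [hp, decide_false, Bool.false_eq_true, if_false]
        refine ⟨by simp [PySem.List.length_pySetD, hl1], by simp [PySem.List.length_pySetD, hl2], ?_⟩
        intro k hkle
        rw [him1, hEm, hOm, hgetA]
        constructor
        · rw [PySem.List.pyGetD_pySetD_natCast prev.1 (m+1) k _ _ (by omega)]
          by_cases hkm : k = m + 1
          · subst hkm; simp [EP_succ, hp]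
          · rw [if_neg hkm, (hk k (by omega)).1]
        · rw [PySem.List.pyGetD_pySetD_natCast prev.2 (m+1) k _ _ (by omega)]
          by_cases hkm : k = m + 1
          · subst hkm; simp [OP_succ, hp]
          · rw [if_neg hkm, (hk k (by omega)).2]

lemma cond_iff (A : List Int) (j : Nat) :
    (EP A j + (OP A A.length - OP A (j+1)) = OP A j + (EP A A.length - EP A (j+1)))
    ↔ 2 * PS A j + sg j (A.getD j 0) = PS A A.length := by
  have h1 := PS_eq A j
  have h2 := PS_eq A (j+1)
  have h3 := PS_eq A A.length
  have h4 := PS_succ A j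
  omega

-- the second loop body agrees with counting `pcond` once the tables are correct
lemma step2_eq (A : List Int) (pe po : List Int) (hn : 1 ≤ A.length)
    (hinv : ∀ k, k ≤ A.length - 1 →
      PySem.List.pyGetD pe (k : Int) 0 = EP A (k+1) ∧
      PySem.List.pyGetD po (k : Int) 0 = OP A (k+1))
    (c : Int) (j : Nat) (hj : j < A.length) :
    solveStep2 A pe po c (j : Int) = if pcond A j then c + 1 else c := by
  have hEb : (if ((j:Int) == 0) = true then (0:Int) else PySem.List.pyGetD pe ((j:Int)-1) 0) = EP A j := by
    by_cases h0 : j = 0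
    · subst h0; simp [EP]
    · have hb : ((j:Int) == 0) = false := by simp [h0]
      rw [hb, show ((j:Int)-1) = ((j-1 : Nat) : Int) by omega]
      rw [(hinv (j-1) (by omega)).1, Nat.sub_add_cancel (by omega)]
      simp
  have hOb : (if ((j:Int) == 0) = true then (0:Int) else PySem.List.pyGetD po ((j:Int)-1) 0) = OP A j := by
    by_cases h0 : j = 0
    · subst h0; simp [OP]
    · have hb : ((j:Int) == 0) = false := by simp [h0]
      rw [hb, show ((j:Int)-1) = ((j-1 : Nat) : Int) by omega]
      rw [(hinv (j-1) (by omega)).2, Nat.sub_add_cancel (by omega)]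
      simp
  have hlast : ((A.length : Int) - 1) = ((A.length - 1 : Nat) : Int) := by omega
  have hEn : PySem.List.pyGetD pe ((A.length : Int)-1) 0 = EP A A.length := by
    rw [hlast, (hinv (A.length - 1) (le_refl _)).1, Nat.sub_add_cancel hn]
  have hOn : PySem.List.pyGetD po ((A.length : Int)-1) 0 = OP A A.length := by
    rw [hlast, (hinv (A.length - 1) (le_refl _)).2, Nat.sub_add_cancel hn]
  have hEj := (hinv j (by omega)).1
  have hOj := (hinv j (by omega)).2
  simp only [solveStep2]
  rw [hEb, hOb, hEn, hOn, hEj, hOj]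
  have hb : (EP A j + (OP A A.length - OP A (j+1)) == OP A j + (EP A A.length - EP A (j+1)))
      = pcond A j := by
    rw [Bool.eq_iff_iff]
    simp only [beq_iff_eq, pcond]
    exact cond_iff A j
  rw [hb]

lemma enum_eq (A : List Int) :
    ∀ k : Nat, PySem.List.enumerate A (k : Int)
      = (List.range A.length).map (fun j : Nat => (((k + j : Nat) : Int), A.getD j 0)) := by
  induction A with
  | nil => intro k; rfl
  | cons a l ih =>
      intro k
      have h1 : PySem.List.enumerate (a :: l) (k : Int) = ((k:Int), a) :: PySem.List.enumerate l ((k:Int)+1) := rfl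
      have h2 : ((k:Int)+1) = (((k+1 : Nat)):Int) := by push_cast; ring
      rw [h1, h2, ih (k+1)]
      simp [List.range_succ_eq_map, List.map_map, Function.comp]
      intro j hj
      omega

lemma enum_eq0 (A : List Int) :
    PySem.List.enumerate A = (List.range A.length).map (fun j : Nat => ((j : Int), A.getD j 0)) := by
  simpa using enum_eq A 0

-- B's counting fold, characterised
lemma bfold (A : List Int) :
    ∀ m, (List.range m).foldl (fun (st : Int × Int) (j : Nat) =>
        (if 2 * st.2 + sg j (A.getD j 0) == PS A A.length then st.1 + 1 else st.1,
         st.2 + sg j (A.getD j 0))) ((0:Int), (0:Int))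
      = (((List.range m).countP (pcond A) : Int), PS A m) := by
  intro m
  induction m with
  | zero => simp [PS]
  | succ m ih =>
      rw [List.range_succ, List.foldl_append, ih, List.countP_append]
      simp [PS_succ, pcond]
      split_ifs <;> omega

lemma solve_alt_eq (A : List Int) :
    solve_alt A = ((List.range A.length).countP (pcond A) : Int) := by
  have hT : (PySem.List.enumerate A).foldl
      (fun t p => t + (if PySem.Int.mod p.1 2 == 0 then p.2 else -p.2)) 0 = PS A A.length := by
    rw [enum_eq0, List.foldl_map]
    rw [PySem.List.foldl_congr_mem _ _ (fun (t : Int) (j : Nat) => t + sg j (A.getD j 0)) _ (by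
      intro t j _
      simp only [modBeq, sg]
      split_ifs <;> simp_all)]
    rw [PySem.List.foldl_add]
    simp [PS]
  rw [solve_alt, hT, solveAltGo, enum_eq0, List.foldl_map]
  rw [PySem.List.foldl_congr_mem _ _ (fun (st : Int × Int) (j : Nat) =>
        (if 2 * st.2 + sg j (A.getD j 0) == PS A A.length then st.1 + 1 else st.1,
         st.2 + sg j (A.getD j 0))) _ (by
    intro st j _
    simp only [modBeq, sg]
    split_ifs <;> simp_all)]
  rw [bfold A A.length]

-- ===== VERDICT (by name: the statement is the Claim_ definition above) =====
theorem solve_spec : Claim_equal_solve := by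
  intro A _ hpre
  unfold Spec_solve
  rw [solve_alt_eq]
  have hlen : 1 ≤ A.length := List.length_pos_iff.mpr hpre
  simp only [solve]
  have hcast : PySem.List.pyRange 1 (A.length : Int)
      = PySem.List.pyRange 1 ((1 + (A.length - 1) : Nat) : Int) := by
    congr 1
    omega
  rw [hcast]
  obtain ⟨hl1, hl2, hk⟩ := loop1_inv A hpre (A.length - 1) le_rfl
  rw [PySem.List.pyRange_zero_natCast A.length, List.foldl_map]
  rw [PySem.List.foldl_congr_mem _ _ (fun (c : Int) (j : Nat) => if pcond A j then c + 1 else c) _ (by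
    intro c j hj
    exact step2_eq A _ _ hlen hk c j (List.mem_range.mp hj))]
  rw [PySem.List.foldl_count_if (pcond A) (List.range A.length) 0]
  omega
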